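-- pv_equiv track=rewrite | github.com/astorrs276/Python-Programs | Leetle Programs/2025/8-1 Word Chain Validator.py | solve
-- ===== SOURCE A (Python) =====
-- def solve(words):
--     first = sorted([word[0] for word in words])
--     last = sorted([word[-1] for word in words])
--     for i in range(len(first)):
--         for j in range(len(last)):
--             if first[:i] + first[i + 1:] == last[:j] + last[j + 1:]:
--                 return True
--     return words == []
-- ===== SOURCE B (Python) =====
-- def solve(words):
--     first = sorted([word[0] for word in words])
--     last = sorted([word[-1] for word in words])
--     i = j = surplus = 0
--     while i < len(first):
--         if j >= len(last) or first[i] < last[j]: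
--             surplus += 1
--             i += 1
--         elif first[i] > last[j]:
--             j += 1
--         else:
--             i += 1
--             j += 1
--     return surplus <= 1
-- ===== Notes on version B (the rewrite author's own statement) =====
-- stated objective: faster
-- what changed: A tries every index pair (i, j) and compares the two delete-one slices (quadratic pairs, each comparison linear); B makes a single two-pointer merge over the two sorted letter lists, counting first-letters with no matching last-letter, and returns surplus <= 1.
import Mathlib
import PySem

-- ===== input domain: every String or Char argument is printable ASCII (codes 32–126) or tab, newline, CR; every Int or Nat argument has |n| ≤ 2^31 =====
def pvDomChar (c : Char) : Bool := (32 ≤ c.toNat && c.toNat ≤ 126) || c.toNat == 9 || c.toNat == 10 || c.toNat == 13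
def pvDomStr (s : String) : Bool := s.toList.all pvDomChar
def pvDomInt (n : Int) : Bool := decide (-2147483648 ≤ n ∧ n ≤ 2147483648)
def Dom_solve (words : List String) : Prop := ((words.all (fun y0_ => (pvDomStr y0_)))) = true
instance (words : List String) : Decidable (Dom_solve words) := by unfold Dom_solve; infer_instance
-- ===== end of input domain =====

-- B replaces A's quadruple-nested delete-one-and-compare search over all index pairs by a single
-- two-pointer merge of the two sorted letter lists counting unmatched first-letters (faster).

-- ===== PORT A =====
-- A: first = sorted([word[0] for word in words]); last = sorted([word[-1] for word in words]);
-- double loop over index pairs comparing the two delete-one slices; fallback 'words == []'.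
-- '.getD ' '' is unreachable under Pre_solve (every word is nonempty, so pyGet? is 'some').
def solve (words : List String) : Bool :=
  let first := PySem.List.sorted (words.map (fun word => (PySem.Str.pyGet? word 0).getD ' ')) (fun c => c) false
  let last := PySem.List.sorted (words.map (fun word => (PySem.Str.pyGet? word (-1)).getD ' ')) (fun c => c) false
  if (PySem.List.pyRange 0 (first.length : Int) 1).any (fun i =>
       (PySem.List.pyRange 0 (last.length : Int) 1).any (fun j =>
         decide (PySem.List.slice first none (some i) ++ PySem.List.slice first (some (i+1)) none
           = PySem.List.slice last none (some j) ++ PySem.List.slice last (some (j+1)) none)))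
  then true
  else decide (words = [])

-- ===== PORT B =====
-- B's while loop walks the two sorted lists with indices i, j; here the positions 'i, j' are the
-- suffixes of the two lists, and 'surplus += 1' is the '1 +' of the recursive call.
def twoPtr (f l : List Char) : Nat :=
  match f, l with
  | [], _ => 0
  | _::f', [] => 1 + twoPtr f' []            -- j >= len(last): count a surplus, i += 1
  | a::f', b::l' =>
      if a < b then 1 + twoPtr f' (b::l')    -- first[i] < last[j]: surplus += 1, i += 1
      else if b < a then twoPtr (a::f') l'   -- first[i] > last[j]: j += 1
      else twoPtr f' l'                      -- equal: i += 1, j += 1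
termination_by f.length + l.length

def solve_alt (words : List String) : Bool :=
  let first := PySem.List.sorted (words.map (fun word => (PySem.Str.pyGet? word 0).getD ' ')) (fun c => c) false
  let last := PySem.List.sorted (words.map (fun word => (PySem.Str.pyGet? word (-1)).getD ' ')) (fun c => c) false
  decide (twoPtr first last ≤ 1)

-- ===== PRECONDITION & SPEC =====
-- Pre_ excludes lists containing an empty word: there 'word[0]' raises IndexError in both A and B.
def Pre_solve (words : List String) : Prop := ∀ w ∈ words, w ≠ ""
instance (words : List String) : Decidable (Pre_solve words) := by unfold Pre_solve; infer_instance
def pvWitness_solve : List String := ["ab", "bc", "ca"]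

def Spec_solve (words : List String) (out : Bool) : Prop := out = solve_alt words
instance (words : List String) (out : Bool) : Decidable (Spec_solve words out) := by unfold Spec_solve; infer_instance

-- ===== CLAIM (what is proved, stated in full; the proofs are below) =====
def Claim_equal_solve : Prop := ∀ (words : List String), Dom_solve words → Pre_solve words → Spec_solve words (solve words)

-- ===== LEMMAS AND PROOFS =====

-- twoPtr against [] counts everything
lemma twoPtr_nil (f : List Char) : twoPtr f [] = f.length := by
  induction f with
  | nil => simp [twoPtr]
  | cons a f ih => simp [twoPtr, ih]; omega

-- surplus is at least the length difference
lemma twoPtr_lb (f l : List Char) : f.length ≤ l.length + twoPtr f l := by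
  fun_induction twoPtr f l with
  | case1 l => simp
  | case2 a f' ih => simp [twoPtr_nil]
  | case3 a f' b l' h ih => simp at *; omega
  | case4 a f' b l' h h' ih => simp at *; omega
  | case5 a f' b l' h h' ih => simp at *; omega

-- greedy matching of sorted lists: surplus 0 iff f is a sublist of l
lemma twoPtr_eq_zero_iff (f l : List Char)
    (hf : f.Pairwise (· ≤ ·)) (hl : l.Pairwise (· ≤ ·)) :
    twoPtr f l = 0 ↔ List.Sublist f l := by
  fun_induction twoPtr f l with
  | case1 l => simp
  | case2 a f' ih => simp
  | case3 a f' b l' hab ih =>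
    constructor
    · omega
    · intro hs
      have ha : a ∈ b :: l' := hs.subset (by simp)
      rcases List.pairwise_cons.mp hl with ⟨hb, _⟩
      rcases List.mem_cons.mp ha with rfl | ha
      · exact absurd hab (lt_irrefl _)
      · exact absurd hab (not_lt.mpr (hb a ha))
  | case4 a f' b l' hab hba ih =>
    rw [ih hf (List.pairwise_cons.mp hl).2]
    rw [List.cons_sublist_cons']
    constructor
    · intro h; exact Or.inl h
    · rintro (h | ⟨rfl, _⟩)
      · exact h
      · exact absurd hba (lt_irrefl _)
  | case5 a f' b l' hab hba ih =>
    have hab2 : a = b := le_antisymm (not_lt.mp hba) (not_lt.mp hab)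
    subst hab2
    rw [ih (List.pairwise_cons.mp hf).2 (List.pairwise_cons.mp hl).2]
    exact (List.cons_sublist_cons).symm

-- deleting one index is exactly a sublist one shorter
lemma exists_eraseIdx_iff (f l : List Char) :
    (∃ j, j < l.length ∧ l.eraseIdx j = f) ↔ (List.Sublist f l ∧ f.length + 1 = l.length) := by
  constructor
  · rintro ⟨j, hj, rfl⟩
    exact ⟨List.eraseIdx_sublist l j, by rw [List.length_eraseIdx_of_lt hj]; omega⟩
  · rintro ⟨hs, hlen⟩
    induction hs with
    | slnil => simp at hlen
    | cons b hs ih =>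
      rename_i f' l'
      have : f'.length = l'.length := by
        have := hs.length_le; simp at hlen; omega
      have hfe : f' = l' := hs.eq_of_length this
      subst hfe
      exact ⟨0, by simp, by simp⟩
    | cons₂ b hs ih =>
      rename_i f' l'
      have hlen' : f'.length + 1 = l'.length := by simp at hlen; omega
      rcases ih hlen' with ⟨j, hj, hje⟩
      exact ⟨j + 1, by simpa using hj, by simp [hje]⟩

-- one list one longer: surplus ≤ 1 iff the shorter is a sublist of the longer
lemma twoPtr_le_one_iff (f l : List Char)
    (hf : f.Pairwise (· ≤ ·)) (hl : l.Pairwise (· ≤ ·)) (hlen : f.length = l.length + 1) :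
    twoPtr f l ≤ 1 ↔ List.Sublist l f := by
  fun_induction twoPtr f l with
  | case1 l => simp at hlen
  | case2 a f' ih =>
    have : f' = [] := by simpa using hlen
    subst this
    simp [twoPtr_nil]
  | case3 a f' b l' hab ih =>
    have hlen' : f'.length = (b :: l').length := by simp at hlen ⊢; omega
    have hf' := (List.pairwise_cons.mp hf).2
    constructor
    · intro h
      have h0 : twoPtr f' (b :: l') = 0 := by omega
      have := ((twoPtr_eq_zero_iff f' (b :: l') hf' hl).mp h0).eq_of_length hlen'
      subst this
      exact List.Sublist.cons a (List.Sublist.refl _)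
    · intro hs
      rcases List.cons_sublist_cons'.mp hs with h | ⟨rfl, _⟩
      · have hfe : b :: l' = f' := h.eq_of_length hlen'.symm
        have h0 : twoPtr f' (b :: l') = 0 := by
          rw [← hfe]
          exact (twoPtr_eq_zero_iff _ _ hl hl).mpr (List.Sublist.refl _)
        omega
      · exact absurd hab (lt_irrefl _)
  | case4 a f' b l' hab hba ih =>
    constructor
    · intro h
      have := twoPtr_lb (a :: f') l'
      simp at hlen this; omega
    · intro hs
      have hb : b ∈ a :: f' := hs.subset (by simp)
      rcases List.pairwise_cons.mp hf with ⟨haf, _⟩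
      rcases List.mem_cons.mp hb with rfl | hb
      · exact absurd hba (lt_irrefl _)
      · exact absurd hba (not_lt.mpr (haf b hb))
  | case5 a f' b l' hab hba ih =>
    have hab2 : a = b := le_antisymm (not_lt.mp hba) (not_lt.mp hab)
    subst hab2
    have hf' := (List.pairwise_cons.mp hf).2
    have hl' := (List.pairwise_cons.mp hl).2
    have hlen' : f'.length = l'.length + 1 := by simp at hlen; omega
    rw [ih hf' hl' hlen']
    constructor
    · intro h; exact List.Sublist.cons₂ a h
    · intro hs
      rcases List.cons_sublist_cons'.mp hs with h | ⟨_, h⟩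
      · have : a :: l' = f' := h.eq_of_length (by simp [hlen'])
        rw [← this]
        exact List.Sublist.cons a (List.Sublist.refl _)
      · exact h

-- the heart: on sorted equal-length nonempty lists, some delete-one pair matches iff surplus ≤ 1
lemma exists_delete_iff_twoPtr_le_one (f l : List Char)
    (hf : f.Pairwise (· ≤ ·)) (hl : l.Pairwise (· ≤ ·))
    (hlen : f.length = l.length) (hne : f ≠ []) :
    (∃ i, i < f.length ∧ ∃ j, j < l.length ∧ f.eraseIdx i = l.eraseIdx j) ↔ twoPtr f l ≤ 1 := by
  fun_induction twoPtr f l with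
  | case1 l => exact absurd rfl hne
  | case2 a f' ih => simp at hlen
  | case3 a f' b l' hab ih =>
    -- a < b: a is below every element of l, so only deleting index 0 on the left can work
    rcases List.pairwise_cons.mp hl with ⟨hbl, _⟩
    have hf' := (List.pairwise_cons.mp hf).2
    have halt : ∀ x ∈ b :: l', a < x := by
      intro x hx
      rcases List.mem_cons.mp hx with rfl | hx
      · exact hab
      · exact lt_of_lt_of_le hab (hbl x hx)
    have key : (∃ i, i < (a :: f').length ∧ ∃ j, j < (b :: l').length ∧
        (a :: f').eraseIdx i = (b :: l').eraseIdx j) ↔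
        (∃ j, j < (b :: l').length ∧ (b :: l').eraseIdx j = f') := by
      constructor
      · rintro ⟨i, hi, j, hj, hij⟩
        match i with
        | 0 => exact ⟨j, hj, by simpa using hij.symm⟩
        | Nat.succ k =>
          exfalso
          rw [List.eraseIdx_cons_succ] at hij
          have hlen2 : ((b :: l').eraseIdx j).length = (b :: l').length - 1 :=
            List.length_eraseIdx_of_lt hj
          have hne2 : (b :: l').eraseIdx j ≠ [] := by
            intro h0
            rw [h0] at hij; simp at hij
          rcases List.exists_cons_of_ne_nil hne2 with ⟨c, rest, hc⟩
          rw [hc] at hij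
          have : a = c := by injection hij
          have hcmem : c ∈ (b :: l') := ((List.eraseIdx_sublist _ j).subset) (hc ▸ List.mem_cons_self)
          exact absurd (this ▸ halt c hcmem) (lt_irrefl a)
      · rintro ⟨j, hj, hje⟩
        exact ⟨0, by simp, j, hj, by simpa using hje.symm⟩
    rw [key, exists_eraseIdx_iff f' (b :: l')]
    have hlen' : f'.length + 1 = (b :: l').length := by simpa using hlen
    have hz := twoPtr_eq_zero_iff f' (b :: l') hf' hl
    constructor
    · rintro ⟨hs, _⟩
      have := hz.mpr hs
      omega
    · intro h
      exact ⟨hz.mp (by omega), hlen'⟩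
  | case4 a f' b l' hab hba ih =>
    -- b < a: b is below every element of f, so only deleting index 0 on the right can work
    rcases List.pairwise_cons.mp hf with ⟨haf, _⟩
    have hl' := (List.pairwise_cons.mp hl).2
    have hblt : ∀ x ∈ a :: f', b < x := by
      intro x hx
      rcases List.mem_cons.mp hx with rfl | hx
      · exact hba
      · exact lt_of_lt_of_le hba (haf x hx)
    have key : (∃ i, i < (a :: f').length ∧ ∃ j, j < (b :: l').length ∧
        (a :: f').eraseIdx i = (b :: l').eraseIdx j) ↔
        (∃ i, i < (a :: f').length ∧ (a :: f').eraseIdx i = l') := by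
      constructor
      · rintro ⟨i, hi, j, hj, hij⟩
        match j with
        | 0 => exact ⟨i, hi, by simpa using hij⟩
        | Nat.succ k =>
          exfalso
          rw [List.eraseIdx_cons_succ] at hij
          have hne2 : (a :: f').eraseIdx i ≠ [] := by
            intro h0
            rw [h0] at hij; simp at hij
          rcases List.exists_cons_of_ne_nil hne2 with ⟨c, rest, hc⟩
          rw [hc] at hij
          have : c = b := by injection hij
          have hcmem : c ∈ (a :: f') := ((List.eraseIdx_sublist _ i).subset) (hc ▸ List.mem_cons_self)
          exact absurd (this ▸ hblt c hcmem) (lt_irrefl b)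
      · rintro ⟨i, hi, hie⟩
        exact ⟨i, hi, 0, by simp, by simpa using hie⟩
    rw [key, exists_eraseIdx_iff l' (a :: f')]
    have hlen' : l'.length + 1 = (a :: f').length := by simp at hlen ⊢; omega
    have hz := twoPtr_le_one_iff (a :: f') l' hf hl' (by omega)
    constructor
    · rintro ⟨hs, _⟩
      exact hz.mpr hs
    · intro h
      exact ⟨hz.mp h, hlen'⟩
  | case5 a f' b l' hab hba ih =>
    -- equal heads: the problem reduces to the tails
    have hab2 : a = b := le_antisymm (not_lt.mp hba) (not_lt.mp hab)
    subst hab2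
    have hf' := (List.pairwise_cons.mp hf).2
    have hl' := (List.pairwise_cons.mp hl).2
    have hlen' : f'.length = l'.length := by simpa using hlen
    by_cases hne' : f' = []
    · subst hne'
      have : l' = [] := List.length_eq_zero_iff.mp hlen'.symm
      subst this
      constructor
      · intro _
        simp [twoPtr]
      · intro _
        exact ⟨0, by simp, 0, by simp, rfl⟩
    · rw [← ih hf' hl' hlen' hne']
      have hlne' : l' ≠ [] := by
        intro h0; rw [h0] at hlen'; exact hne' (List.length_eq_zero_iff.mp hlen')
      constructor
      · rintro ⟨i, hi, j, hj, hij⟩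
        match i, j with
        | 0, 0 =>
          simp at hij
          subst hij
          exact ⟨0, by simpa using List.length_pos_of_ne_nil hne', 0,
            by simpa using List.length_pos_of_ne_nil hlne', rfl⟩
        | 0, Nat.succ m =>
          rw [List.eraseIdx_cons_zero, List.eraseIdx_cons_succ] at hij
          refine ⟨0, by simpa using List.length_pos_of_ne_nil hne', m, by simpa using hj, ?_⟩
          rw [hij]; simp
        | Nat.succ k, 0 =>
          rw [List.eraseIdx_cons_zero, List.eraseIdx_cons_succ] at hij
          refine ⟨k, by simpa using hi, 0, by simpa using List.length_pos_of_ne_nil hlne', ?_⟩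
          rw [← hij]; simp
        | Nat.succ k, Nat.succ m =>
          rw [List.eraseIdx_cons_succ, List.eraseIdx_cons_succ] at hij
          exact ⟨k, by simpa using hi, m, by simpa using hj, by injection hij⟩
      · rintro ⟨i, hi, j, hj, hij⟩
        exact ⟨i + 1, by simpa using hi, j + 1, by simpa using hj, by simp [hij]⟩

-- the inner double 'any' loop of A recognises exactly the delete-one existence
lemma anyLoop_eq (f l : List Char) (hlen : f.length = l.length) :
    ((PySem.List.pyRange 0 (f.length : Int) 1).any (fun i =>
       (PySem.List.pyRange 0 (l.length : Int) 1).any (fun j =>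
         decide (PySem.List.slice f none (some i) ++ PySem.List.slice f (some (i+1)) none
           = PySem.List.slice l none (some j) ++ PySem.List.slice l (some (j+1)) none))) = true) ↔
    (∃ i, i < f.length ∧ ∃ j, j < l.length ∧ f.eraseIdx i = l.eraseIdx j) := by
  rw [List.any_eq_true]
  constructor
  · rintro ⟨i, hi, hinner⟩
    rw [List.any_eq_true] at hinner
    rcases hinner with ⟨j, hj, heq⟩
    rw [PySem.List.mem_pyRange_one] at hi hj
    rw [decide_eq_true_iff] at heq
    rw [PySem.List.slice_to f hi.1, PySem.List.slice_from f (by omega : (0:Int) ≤ i + 1),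
        PySem.List.slice_to l hj.1, PySem.List.slice_from l (by omega : (0:Int) ≤ j + 1)] at heq
    refine ⟨i.toNat, by omega, j.toNat, by omega, ?_⟩
    rw [List.eraseIdx_eq_take_drop_succ, List.eraseIdx_eq_take_drop_succ]
    have h1 : (i + 1).toNat = i.toNat + 1 := by omega
    have h2 : (j + 1).toNat = j.toNat + 1 := by omega
    rw [h1, h2] at heq
    exact heq
  · rintro ⟨i, hi, j, hj, heq⟩
    refine ⟨(i : Int), PySem.List.mem_pyRange_one.mpr (by omega), ?_⟩
    rw [List.any_eq_true]
    refine ⟨(j : Int), PySem.List.mem_pyRange_one.mpr (by omega), ?_⟩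
    rw [decide_eq_true_iff]
    rw [PySem.List.slice_to f (by omega), PySem.List.slice_from f (by omega),
        PySem.List.slice_to l (by omega), PySem.List.slice_from l (by omega)]
    have h1 : ((i : Int) + 1).toNat = i + 1 := by omega
    have h2 : ((j : Int) + 1).toNat = j + 1 := by omega
    rw [h1, h2]
    simp only [Int.toNat_natCast]
    rw [List.eraseIdx_eq_take_drop_succ, List.eraseIdx_eq_take_drop_succ] at heq
    exact heq

-- ===== VERDICT (by name: the statement is the Claim_ definition above) =====
theorem solve_spec : Claim_equal_solve := by
  intro words _ _
  unfold Spec_solve solve solve_alt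
  set fs := PySem.List.sorted (words.map (fun word => (PySem.Str.pyGet? word 0).getD ' ')) (fun c => c) false with hfs
  set ls := PySem.List.sorted (words.map (fun word => (PySem.Str.pyGet? word (-1)).getD ' ')) (fun c => c) false with hls
  have hsf : fs.Pairwise (· ≤ ·) := PySem.List.sorted_pairwise _ _
  have hsl : ls.Pairwise (· ≤ ·) := PySem.List.sorted_pairwise _ _
  have hlf : fs.length = words.length := by
    rw [hfs, PySem.List.length_sorted, List.length_map]
  have hll : ls.length = words.length := by
    rw [hls, PySem.List.length_sorted, List.length_map]
  by_cases hw : words = []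
  · subst hw
    have h1 : fs = [] := List.length_eq_zero_iff.mp (by simp [hlf])
    have h2 : ls = [] := List.length_eq_zero_iff.mp (by simp [hll])
    rw [h1, h2]
    simp [PySem.List.pyRange, twoPtr]
  · have hfne : fs ≠ [] := by
      intro h0
      rw [h0] at hlf
      exact hw (List.length_eq_zero_iff.mp hlf.symm)
    have hmain := (anyLoop_eq fs ls (by omega)).trans
      (exists_delete_iff_twoPtr_le_one fs ls hsf hsl (by omega) hfne)
    by_cases hc : twoPtr fs ls ≤ 1
    · rw [if_pos (hmain.mpr hc)]
      simp [hc]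
    · have : ¬ ((PySem.List.pyRange 0 (fs.length : Int) 1).any _ = true) := fun h => hc (hmain.mp h)
      rw [if_neg this]
      simp [hw, hc]
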